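-- pv_equiv track=rewrite | github.com/GitMonsters/octotetrahedral-agi | core/primitives.py | p_self_tile
-- ===== SOURCE A (Python) =====
-- from typing import List, Dict, Tuple, Optional, Callable, Any, Set
--
-- Grid = List[List[int]]
--
-- def p_self_tile(grid: Grid) -> Grid:
--     """Kronecker self-tiling: each non-zero cell → copy of input, zero → empty block.
--     Solves tasks like 007bbfb7 where 3x3→9x9 by self-replication."""
--     h, w = len(grid), len(grid[0])
--     if h * h > 100 or w * w > 100:  # guard against huge grids
--         return grid
--     result = [[0] * (w * w) for _ in range(h * h)]
--     for r in range(h):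
--         for c in range(w):
--             if grid[r][c] != 0:
--                 for gr in range(h):
--                     for gc in range(w):
--                         result[r * h + gr][c * w + gc] = grid[gr][gc]
--     return result
-- ===== SOURCE B (Python) =====
-- def p_self_tile(grid):
--     """Kronecker self-tiling: each non-zero cell -> copy of input, zero -> empty block."""
--     h, w = len(grid), len(grid[0])
--     if h * h > 100 or w * w > 100:  # guard against huge grids
--         return grid
--     result = []
--     for r in range(h):
--         for gr in range(h):
--             row = []
--             for c in range(w):
--                 if grid[r][c] != 0:
--                     row += grid[gr][:w]
--                 else:
--                     row += [0] * w
--             result.append(row)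
--     return result
-- ===== Notes on version B (the rewrite author's own statement) =====
-- stated objective: alternative
-- what changed: B assembles the output row by row by concatenating per-cell blocks (append/extend), instead of A's scatter-writes of index blocks into a preallocated zero matrix.
import Mathlib
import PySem

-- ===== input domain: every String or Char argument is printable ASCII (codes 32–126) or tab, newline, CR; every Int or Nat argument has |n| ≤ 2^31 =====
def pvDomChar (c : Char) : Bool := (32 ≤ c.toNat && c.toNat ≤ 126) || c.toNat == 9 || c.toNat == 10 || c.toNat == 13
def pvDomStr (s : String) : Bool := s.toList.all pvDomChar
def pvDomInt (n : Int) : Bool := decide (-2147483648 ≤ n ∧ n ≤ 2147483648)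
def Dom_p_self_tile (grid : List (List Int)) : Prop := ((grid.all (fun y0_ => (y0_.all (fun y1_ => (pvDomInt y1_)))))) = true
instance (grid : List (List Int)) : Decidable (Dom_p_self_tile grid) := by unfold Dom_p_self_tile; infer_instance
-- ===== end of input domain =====

-- B assembles the tiled grid row by row via concatenation instead of A's scatter-writes into a preallocated zero matrix (alternative decomposition, same cost).


-- ===== PORT A =====
def p_self_tile (grid : List (List Int)) : List (List Int) :=
  let h := grid.length
  let w := ((PySem.List.pyGet? grid 0).getD []).length
  if h * h > 100 ∨ w * w > 100 then grid
  else
    let result := (List.range (h * h)).map (fun _ => List.replicate (w * w) (0 : Int))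
    (List.range h).foldl (fun result r =>
      (List.range w).foldl (fun result c =>
        if (grid.getD r []).getD c 0 ≠ 0 then
          (List.range h).foldl (fun result gr =>
            (List.range w).foldl (fun result gc =>
              result.set (r * h + gr)
                ((result.getD (r * h + gr) []).set (c * w + gc) ((grid.getD gr []).getD gc 0)))
              result) result
        else result) result) result

-- ===== PORT B =====
def p_self_tile_alt (grid : List (List Int)) : List (List Int) :=
  let h := grid.length
  let w := ((PySem.List.pyGet? grid 0).getD []).length
  if h * h > 100 ∨ w * w > 100 then grid
  else
    (List.range h).foldl (fun result r =>
      (List.range h).foldl (fun result gr =>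
        let row := (List.range w).foldl (fun row c =>
          row ++ (if (grid.getD r []).getD c 0 ≠ 0 then (grid.getD gr []).take w
                  else List.replicate w (0 : Int))) ([] : List Int)
        result ++ [row]) result) []

-- ===== PRECONDITION & SPEC =====
-- Pre_ excludes exactly the inputs where the Python A raises IndexError: the empty grid
-- (grid[0]), and — when the size guard does not fire — ragged grids with a row shorter
-- than the first row (grid[r][c] / grid[gr][gc]).
def Pre_p_self_tile (grid : List (List Int)) : Prop :=
  grid ≠ [] ∧
  (grid.length * grid.length ≤ 100 → (grid.headD []).length * (grid.headD []).length ≤ 100 →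
    ∀ row ∈ grid, (grid.headD []).length ≤ row.length)
instance (grid : List (List Int)) : Decidable (Pre_p_self_tile grid) := by
  unfold Pre_p_self_tile; infer_instance
def pvWitness_p_self_tile : List (List Int) := [[1, 0], [0, 2]]

def Spec_p_self_tile (grid : List (List Int)) (out : List (List Int)) : Prop := out = p_self_tile_alt grid
instance (grid : List (List Int)) (out : List (List Int)) : Decidable (Spec_p_self_tile grid out) := by unfold Spec_p_self_tile; infer_instance

-- ===== CLAIM (what is proved, stated in full; the proofs are below) =====
def Claim_equal_p_self_tile : Prop := ∀ (grid : List (List Int)), Dom_p_self_tile grid → Pre_p_self_tile grid → Spec_p_self_tile grid (p_self_tile grid)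


-- ===== LEMMAS AND PROOFS =====

-- entry (a,b) of the grid, Python-style `grid[a][b]` for in-range indices
def cellI (grid : List (List Int)) (a b : Nat) : Int := (grid.getD a []).getD b 0

-- all index pairs (a,b) with a < m, b < n, in row-major order
def pairsN (m n : Nat) : List (Nat × Nat) :=
  (List.range m).flatMap (fun a => (List.range n).map (Prod.mk a))

-- closed-form description of the tiled result
def tableI (grid : List (List Int)) (h w : Nat) : List (List Int) :=
  (List.range (h * h)).map (fun i => (List.range (w * w)).map (fun j =>
    if cellI grid (i / h) (j / w) ≠ 0 then cellI grid (i % h) (j % w) else 0))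

-- one scatter-write of A
def writeI (grid : List (List Int)) (h w r c : Nat) (res : List (List Int)) (p : Nat × Nat) :
    List (List Int) :=
  res.set (r * h + p.1) ((res.getD (r * h + p.1) []).set (c * w + p.2) (cellI grid p.1 p.2))

theorem mem_pairsN (m n : Nat) (p : Nat × Nat) : p ∈ pairsN m n ↔ p.1 < m ∧ p.2 < n := by
  cases p
  simp [pairsN, List.mem_flatMap, List.mem_map, List.mem_range, eq_comm, Prod.ext_iff]

theorem foldl_nest {α β γ : Type} (l1 : List α) (l2 : List β) (f : γ → α → β → γ) (init : γ) :
    l1.foldl (fun acc a => l2.foldl (fun acc b => f acc a b) acc) init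
      = (l1.flatMap (fun a => l2.map (Prod.mk a))).foldl (fun acc p => f acc p.1 p.2) init := by
  induction l1 generalizing init with
  | nil => rfl
  | cons a t ih => simp [List.foldl_append, List.foldl_map, ih]

theorem flatMap_congr' {α β : Type} (l : List α) (f g : α → List β)
    (h : ∀ a ∈ l, f a = g a) : l.flatMap f = l.flatMap g := by
  simp only [List.flatMap_def]
  rw [List.map_congr_left h]

theorem flat_pairs {α : Type} (m n : Nat) (e : Nat → Nat → α) :
    (List.range m).flatMap (fun a => (List.range n).map (fun b => e a b))
      = (List.range (m * n)).map (fun j => e (j / n) (j % n)) := by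
  rcases Nat.eq_zero_or_pos n with hn | hn
  · subst hn; simp
  · induction m with
    | zero => simp
    | succ m ih =>
      rw [List.range_succ, List.flatMap_append, ih]
      have : (m + 1) * n = m * n + n := by ring
      rw [this, List.range_add, List.map_append, List.map_map]
      congr 1
      · simp only [List.flatMap_cons, List.flatMap_nil, List.append_nil]
        apply List.map_congr_left
        intro b hb
        have hb' : b < n := List.mem_range.mp hb
        have h1 : (m * n + b) / n = m := by
          rw [Nat.add_comm, Nat.add_mul_div_right _ _ hn, Nat.div_eq_of_lt hb']; omega
        have h2 : (m * n + b) % n = b := by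
          rw [Nat.add_comm, Nat.add_mul_mod_self_right, Nat.mod_eq_of_lt hb']
        simp [Function.comp, h1, h2]

theorem take_eq_map_range (l : List Int) (w : Nat) (hw : w ≤ l.length) :
    l.take w = (List.range w).map (fun b => l.getD b 0) := by
  apply List.ext_getElem
  · simp; omega
  · intro i h1 h2
    have hi : i < w := by simpa using h2
    have hil : i < l.length := lt_of_lt_of_le hi hw
    simp [List.getElem_take, List.getD_eq_getElem?_getD, List.getElem?_eq_getElem hil]

theorem getD_set' {α : Type} (l : List α) (k i : Nat) (a d : α) :
    (l.set k a).getD i d = if i = k ∧ k < l.length then a else l.getD i d := by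
  simp only [List.getD_eq_getElem?_getD, List.getElem?_set]
  split_ifs with h1 h2 h3 h3 <;> simp_all

theorem getD_mem (l : List (List Int)) (i : Nat) (hi : i < l.length) : l.getD i [] ∈ l := by
  rw [List.getD_eq_getElem l [] hi]; exact List.getElem_mem hi

theorem fold_write_spec (grid : List (List Int)) (h w r c : Nat) (hr : r < h) (hc : c < w)
    (ps : List (Nat × Nat)) (res : List (List Int))
    (hps : ∀ p ∈ ps, p.1 < h ∧ p.2 < w)
    (hlen : res.length = h * h) (hrow : ∀ row ∈ res, row.length = w * w) :
    (ps.foldl (writeI grid h w r c) res).length = h * h ∧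
    (∀ row ∈ ps.foldl (writeI grid h w r c) res, row.length = w * w) ∧
    (∀ i j : Nat, i < h * h → j < w * w →
      ((ps.foldl (writeI grid h w r c) res).getD i []).getD j 0 =
        if (∃ p ∈ ps, i = r * h + p.1 ∧ j = c * w + p.2) then cellI grid (i % h) (j % w)
        else (res.getD i []).getD j 0) := by
  induction ps generalizing res with
  | nil => exact ⟨hlen, hrow, by intro i j hi hj; simp⟩
  | cons p t ih =>
    obtain ⟨hp1, hp2⟩ := hps p List.mem_cons_self
    have hk : r * h + p.1 < h * h := by
      calc r * h + p.1 < r * h + h := by omega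
        _ = (r + 1) * h := by ring
        _ ≤ h * h := Nat.mul_le_mul_right h (by omega)
    have hm : c * w + p.2 < w * w := by
      calc c * w + p.2 < c * w + w := by omega
        _ = (c + 1) * w := by ring
        _ ≤ w * w := Nat.mul_le_mul_right w (by omega)
    have hkl : r * h + p.1 < res.length := by omega
    have hrowk : (res.getD (r * h + p.1) []).length = w * w :=
      hrow _ (getD_mem res _ hkl)
    have hlen' : (writeI grid h w r c res p).length = h * h := by
      simp [writeI, hlen]
    have hrow' : ∀ row ∈ writeI grid h w r c res p, row.length = w * w := by
      intro row hmem
      rcases List.mem_or_eq_of_mem_set hmem with hm' | hm'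
      · exact hrow row hm'
      · rw [hm', List.length_set]; exact hrowk
    obtain ⟨L1, L2, L3⟩ := ih (writeI grid h w r c res p)
      (fun q hq => hps q (List.mem_cons_of_mem _ hq)) hlen' hrow'
    refine ⟨L1, L2, ?_⟩
    intro i j hi hj
    rw [List.foldl_cons, L3 i j hi hj]
    have hw1 : ((writeI grid h w r c res p).getD i []).getD j 0 =
        if i = r * h + p.1 ∧ j = c * w + p.2 then cellI grid (i % h) (j % w)
        else (res.getD i []).getD j 0 := by
      unfold writeI
      rw [getD_set']
      by_cases hik : i = r * h + p.1
      · subst hik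
        rw [if_pos ⟨rfl, hkl⟩, getD_set']
        have hmod : (r * h + p.1) % h = p.1 := by
          have e : r * h + p.1 = p.1 + r * h := by ring
          rw [e, Nat.add_mul_mod_self_right, Nat.mod_eq_of_lt hp1]
        by_cases hjm : j = c * w + p.2
        · subst hjm
          rw [if_pos ⟨rfl, by rw [hrowk]; exact hm⟩, if_pos ⟨rfl, rfl⟩]
          have hmod2 : (c * w + p.2) % w = p.2 := by
            have e : c * w + p.2 = p.2 + c * w := by ring
            rw [e, Nat.add_mul_mod_self_right, Nat.mod_eq_of_lt hp2]
          rw [hmod, hmod2]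
        · rw [if_neg (by tauto), if_neg (by tauto)]
      · rw [if_neg (by tauto), if_neg (by tauto)]
    rw [hw1]
    by_cases hEx : ∃ q ∈ t, i = r * h + q.1 ∧ j = c * w + q.2
    · rw [if_pos hEx, if_pos ⟨hEx.choose, List.mem_cons_of_mem _ hEx.choose_spec.1, hEx.choose_spec.2⟩]
    · rw [if_neg hEx]
      by_cases hP : i = r * h + p.1 ∧ j = c * w + p.2
      · rw [if_pos hP, if_pos ⟨p, List.mem_cons_self, hP⟩]
      · rw [if_neg hP, if_neg (by
          rintro ⟨q, hq, hq2⟩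
          rcases List.mem_cons.mp hq with rfl | hq'
          · exact hP hq2
          · exact hEx ⟨q, hq', hq2⟩)]

theorem block_cond (h w r c i j : Nat) (hr : r < h) (hc : c < w) (hi : i < h * h) (hj : j < w * w) :
    (∃ p ∈ pairsN h w, i = r * h + p.1 ∧ j = c * w + p.2) ↔ (i / h = r ∧ j / w = c) := by
  have hh : 0 < h := by omega
  have hw0 : 0 < w := by omega
  constructor
  · rintro ⟨p, hp, rfl, rfl⟩
    obtain ⟨h1, h2⟩ := (mem_pairsN h w p).mp hp
    constructor
    · have : r * h + p.1 = p.1 + r * h := by ring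
      rw [this, Nat.add_mul_div_right _ _ hh, Nat.div_eq_of_lt h1]; omega
    · have : c * w + p.2 = p.2 + c * w := by ring
      rw [this, Nat.add_mul_div_right _ _ hw0, Nat.div_eq_of_lt h2]; omega
  · rintro ⟨h1, h2⟩
    refine ⟨(i % h, j % w), (mem_pairsN h w _).mpr ⟨Nat.mod_lt _ hh, Nat.mod_lt _ hw0⟩, ?_, ?_⟩
    · rw [← h1]; exact (Nat.div_add_mod' i h).symm
    · rw [← h2]; exact (Nat.div_add_mod' j w).symm

theorem fold_cells_spec (grid : List (List Int)) (h w : Nat)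
    (cs : List (Nat × Nat)) (res : List (List Int))
    (hcs : ∀ p ∈ cs, p.1 < h ∧ p.2 < w)
    (hlen : res.length = h * h) (hrow : ∀ row ∈ res, row.length = w * w) :
    (cs.foldl (fun acc p => if cellI grid p.1 p.2 ≠ 0 then
        (pairsN h w).foldl (writeI grid h w p.1 p.2) acc else acc) res).length = h * h ∧
    (∀ row ∈ cs.foldl (fun acc p => if cellI grid p.1 p.2 ≠ 0 then
        (pairsN h w).foldl (writeI grid h w p.1 p.2) acc else acc) res, row.length = w * w) ∧
    (∀ i j : Nat, i < h * h → j < w * w →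
      ((cs.foldl (fun acc p => if cellI grid p.1 p.2 ≠ 0 then
          (pairsN h w).foldl (writeI grid h w p.1 p.2) acc else acc) res).getD i []).getD j 0 =
        if (∃ p ∈ cs, p.1 = i / h ∧ p.2 = j / w) ∧ cellI grid (i / h) (j / w) ≠ 0 then
          cellI grid (i % h) (j % w)
        else (res.getD i []).getD j 0) := by
  induction cs generalizing res with
  | nil => exact ⟨hlen, hrow, by intro i j hi hj; simp⟩
  | cons p t ih =>
    obtain ⟨hp1, hp2⟩ := hcs p List.mem_cons_self
    by_cases hz : cellI grid p.1 p.2 ≠ 0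
    · obtain ⟨W1, W2, W3⟩ := fold_write_spec grid h w p.1 p.2 hp1 hp2 (pairsN h w) res
        (fun q hq => (mem_pairsN h w q).mp hq) hlen hrow
      obtain ⟨L1, L2, L3⟩ := ih ((pairsN h w).foldl (writeI grid h w p.1 p.2) res)
        (fun q hq => hcs q (List.mem_cons_of_mem _ hq)) W1 W2
      refine ⟨by simpa [hz] using L1, by simpa [hz] using L2, ?_⟩
      intro i j hi hj
      rw [List.foldl_cons, if_pos hz, L3 i j hi hj, W3 i j hi hj]
      simp only [block_cond h w p.1 p.2 i j hp1 hp2 hi hj]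
      by_cases hz2 : cellI grid (i / h) (j / w) ≠ 0
      · by_cases hEx : ∃ q ∈ t, q.1 = i / h ∧ q.2 = j / w
        · have hEx' : ∃ q ∈ p :: t, q.1 = i / h ∧ q.2 = j / w :=
            ⟨hEx.choose, List.mem_cons_of_mem _ hEx.choose_spec.1, hEx.choose_spec.2⟩
          rw [if_pos ⟨hEx, hz2⟩, if_pos ⟨hEx', hz2⟩]
        · rw [if_neg (fun hcc => hEx hcc.1)]
          by_cases hP : i / h = p.1 ∧ j / w = p.2
          · rw [if_pos hP, if_pos ⟨⟨p, List.mem_cons_self, hP.1.symm, hP.2.symm⟩, hz2⟩]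
          · rw [if_neg hP, if_neg (by
              rintro ⟨⟨q, hq, hq2⟩, _⟩
              rcases List.mem_cons.mp hq with rfl | hq'
              · exact hP ⟨hq2.1.symm, hq2.2.symm⟩
              · exact hEx ⟨q, hq', hq2⟩)]
      · push Not at hz2
        have hnP : ¬(i / h = p.1 ∧ j / w = p.2) := fun hP =>
          hz (by rw [← hP.1, ← hP.2]; exact hz2)
        rw [if_neg (by tauto), if_neg hnP, if_neg (by tauto)]
    · obtain ⟨L1, L2, L3⟩ := ih res (fun q hq => hcs q (List.mem_cons_of_mem _ hq)) hlen hrow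
      refine ⟨by rw [List.foldl_cons, if_neg hz]; exact L1,
        by rw [List.foldl_cons, if_neg hz]; exact L2, ?_⟩
      intro i j hi hj
      rw [List.foldl_cons, if_neg hz, L3 i j hi hj]
      push Not at hz
      have hiff : ((∃ q ∈ p :: t, q.1 = i / h ∧ q.2 = j / w) ∧ cellI grid (i / h) (j / w) ≠ 0) ↔
          ((∃ q ∈ t, q.1 = i / h ∧ q.2 = j / w) ∧ cellI grid (i / h) (j / w) ≠ 0) := by
        constructor
        · rintro ⟨⟨q, hq, hq2⟩, hnz⟩
          rcases List.mem_cons.mp hq with rfl | hq'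
          · exact absurd (by rw [← hq2.1, ← hq2.2]; exact hz) hnz
          · exact ⟨⟨q, hq', hq2⟩, hnz⟩
        · rintro ⟨⟨q, hq, hq2⟩, hnz⟩
          exact ⟨⟨q, List.mem_cons_of_mem _ hq, hq2⟩, hnz⟩
      simp only [hiff]

theorem pyGet0 (grid : List (List Int)) :
    (PySem.List.pyGet? grid 0).getD [] = grid.headD [] := by
  cases grid <;> simp [PySem.List.pyGet?_zero]

theorem flatMap_singleton_map {α β : Type} (l : List α) (f : α → β) :
    l.flatMap (fun x => [f x]) = l.map f := by
  induction l <;> simp_all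

theorem zero_entry (h w i j : Nat) :
    (((List.range (h * h)).map (fun _ => List.replicate (w * w) (0 : Int))).getD i []).getD j 0
      = 0 := by
  rcases Nat.lt_or_ge i (h * h) with hi | hi
  · have e : ((List.range (h * h)).map (fun _ => List.replicate (w * w) (0 : Int))).getD i []
        = List.replicate (w * w) 0 := by
      rw [List.getD_eq_getElem _ _ (by simpa using hi)]
      simp
    rw [e]
    rcases Nat.lt_or_ge j (w * w) with hj | hj
    · rw [List.getD_eq_getElem _ _ (by simpa using hj)]
      simp
    · exact List.getD_eq_default _ _ (by simpa using hj)
  · have e : ((List.range (h * h)).map (fun _ => List.replicate (w * w) (0 : Int))).getD i []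
        = [] := List.getD_eq_default _ _ (by simpa using hi)
    rw [e]
    simp

theorem table_key (grid : List (List Int)) (h w : Nat) :
    (pairsN h w).foldl
      (fun acc p => if cellI grid p.1 p.2 ≠ 0 then
        (pairsN h w).foldl (writeI grid h w p.1 p.2) acc else acc)
      ((List.range (h * h)).map (fun _ => List.replicate (w * w) (0 : Int)))
    = tableI grid h w := by
  obtain ⟨L1, L2, L3⟩ := fold_cells_spec grid h w (pairsN h w)
    ((List.range (h * h)).map (fun _ => List.replicate (w * w) (0 : Int)))
    (fun p hp => (mem_pairsN h w p).mp hp)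
    (by simp)
    (by intro row hr; obtain ⟨_, _, rfl⟩ := List.mem_map.mp hr; simp)
  apply List.ext_getElem
  · rw [L1]; simp [tableI]
  · intro i h1 h2
    have hi : i < h * h := by rwa [L1] at h1
    apply List.ext_getElem
    · rw [L2 _ (List.getElem_mem h1)]; simp [tableI]
    · intro j hj1 hj2
      have hj : j < w * w := by rwa [L2 _ (List.getElem_mem h1)] at hj1
      have hh0 : 0 < h := Nat.pos_of_ne_zero (fun h0 => by subst h0; simp at hi)
      have hw0 : 0 < w := Nat.pos_of_ne_zero (fun w0 => by subst w0; simp at hj)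
      have key := L3 i j hi hj
      rw [List.getD_eq_getElem _ [] h1, List.getD_eq_getElem _ 0 hj1] at key
      rw [key]
      simp only [tableI, List.getElem_map, List.getElem_range]
      have hex : ∃ p ∈ pairsN h w, p.1 = i / h ∧ p.2 = j / w :=
        ⟨(i / h, j / w), (mem_pairsN h w _).mpr
          ⟨(Nat.div_lt_iff_lt_mul hh0).mpr hi, (Nat.div_lt_iff_lt_mul hw0).mpr hj⟩, rfl, rfl⟩
      by_cases hz : cellI grid (i / h) (j / w) ≠ 0
      · rw [if_pos ⟨hex, hz⟩, if_pos hz]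
      · rw [if_neg (fun hcc => hz hcc.2), if_neg hz, zero_entry]

theorem a_eq_table (grid : List (List Int))
    (hguard : ¬(grid.length * grid.length > 100 ∨
      ((PySem.List.pyGet? grid 0).getD []).length *
        ((PySem.List.pyGet? grid 0).getD []).length > 100)) :
    p_self_tile grid
      = tableI grid grid.length ((PySem.List.pyGet? grid 0).getD []).length := by
  simp only [p_self_tile]
  rw [if_neg hguard]
  simp only [foldl_nest]
  exact table_key grid grid.length ((PySem.List.pyGet? grid 0).getD []).length

theorem rows_to_table (grid : List (List Int)) (h w : Nat) (inner : Nat → Nat → List Int)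
    (hrow : ∀ r gr : Nat, gr < h → inner r gr = (List.range (w * w)).map
      (fun j => if cellI grid r (j / w) ≠ 0 then cellI grid gr (j % w) else 0)) :
    (List.range h).flatMap (fun r => (List.range h).map (fun gr => inner r gr))
      = tableI grid h w := by
  rw [flatMap_congr' _ _ _
    (fun r _ => List.map_congr_left (fun gr hgr => hrow r gr (List.mem_range.mp hgr)))]
  rw [flat_pairs]
  rfl

theorem alt_eq_table (grid : List (List Int))
    (hguard : ¬(grid.length * grid.length > 100 ∨
      ((PySem.List.pyGet? grid 0).getD []).length *
        ((PySem.List.pyGet? grid 0).getD []).length > 100))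
    (hrows : ∀ row ∈ grid, ((PySem.List.pyGet? grid 0).getD []).length ≤ row.length) :
    p_self_tile_alt grid
      = tableI grid grid.length ((PySem.List.pyGet? grid 0).getD []).length := by
  simp only [p_self_tile_alt]
  rw [if_neg hguard]
  simp only [PySem.List.foldl_append_eq_flatMap, List.nil_append, flatMap_singleton_map]
  have hrow : ∀ r gr : Nat, gr < grid.length →
      (List.range ((PySem.List.pyGet? grid 0).getD []).length).flatMap
        (fun c => if cellI grid r c ≠ 0 then
            (grid.getD gr []).take ((PySem.List.pyGet? grid 0).getD []).length
          else List.replicate ((PySem.List.pyGet? grid 0).getD []).length 0)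
      = (List.range (((PySem.List.pyGet? grid 0).getD []).length *
          ((PySem.List.pyGet? grid 0).getD []).length)).map
          (fun j => if cellI grid r (j / ((PySem.List.pyGet? grid 0).getD []).length) ≠ 0 then
              cellI grid gr (j % ((PySem.List.pyGet? grid 0).getD []).length) else 0) := by
    intro r gr hgr
    have htake : (grid.getD gr []).take ((PySem.List.pyGet? grid 0).getD []).length
        = (List.range ((PySem.List.pyGet? grid 0).getD []).length).map
            (fun gc => cellI grid gr gc) :=
      take_eq_map_range _ _ (hrows _ (getD_mem grid gr hgr))
    calc (List.range ((PySem.List.pyGet? grid 0).getD []).length).flatMap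
          (fun c => if cellI grid r c ≠ 0 then
              (grid.getD gr []).take ((PySem.List.pyGet? grid 0).getD []).length
            else List.replicate ((PySem.List.pyGet? grid 0).getD []).length 0)
        = (List.range ((PySem.List.pyGet? grid 0).getD []).length).flatMap
            (fun c => (List.range ((PySem.List.pyGet? grid 0).getD []).length).map
              (fun gc => if cellI grid r c ≠ 0 then cellI grid gr gc else 0)) := by
          apply flatMap_congr'
          intro c _
          by_cases hc : cellI grid r c ≠ 0
          · rw [if_pos hc, htake]
            apply List.map_congr_left
            intro gc _
            rw [if_pos hc]
          · rw [if_neg hc,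
              show (fun gc => if cellI grid r c ≠ 0 then cellI grid gr gc else (0 : Int))
                  = (fun _ => (0 : Int)) from funext fun gc => if_neg hc]
            simp
      _ = _ := flat_pairs _ _ _
  exact rows_to_table grid grid.length ((PySem.List.pyGet? grid 0).getD []).length _ hrow

theorem p_self_tile_spec : Claim_equal_p_self_tile := by
  intro grid _ hpre
  obtain ⟨hne, hrows⟩ := hpre
  unfold Spec_p_self_tile
  by_cases hguard : grid.length * grid.length > 100 ∨
      ((PySem.List.pyGet? grid 0).getD []).length *
        ((PySem.List.pyGet? grid 0).getD []).length > 100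
  · simp only [p_self_tile, p_self_tile_alt]
    rw [if_pos hguard, if_pos hguard]
  · rw [a_eq_table grid hguard, alt_eq_table grid hguard ?_]
    intro row hr
    rw [pyGet0]
    exact hrows (Nat.le_of_not_lt fun hlt => hguard (Or.inl hlt))
      (Nat.le_of_not_lt fun hlt => hguard (Or.inr (by rw [pyGet0]; exact hlt))) row hr
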